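-- pv_equiv track=rewrite | github.com/Veduisback/Tax-Invasion | ai_analysis.py | get_investigation_checklist
-- ===== SOURCE A (Python) =====
-- from typing import Dict, Any, Optional, List
--
-- def get_investigation_checklist(risk_level: str, matched_patterns: List[Dict] = None) -> list:
--     base_checklist = [
--         "Verify business registration (ROC/MCA records)",
--         "Cross-check declared revenue with GST returns",
--         "Verify employee count with PF/ESI records",
--         "Obtain Form 26AS and verify TDS credits"
--     ]
--
--     if risk_level in ["MODERATE", "HIGH", "VERY HIGH", "CRITICAL"]:
--         base_checklist.extend([
--             "Request bank statements for last 3 years",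
--             "Verify land ownership documents with Sub-Registrar",
--             "Check for related party transactions",
--             "Analyze electricity bills vs production capacity",
--             "Verify with local municipal records"
--         ])
--
--     if risk_level in ["HIGH", "VERY HIGH", "CRITICAL"]:
--         base_checklist.extend([
--             "Conduct surprise physical verification (Section 133A)",
--             "Interview key management personnel",
--             "Trace fund flows to related entities",
--             "Check for overseas transactions and accounts",
--             "Obtain information from FIU-IND",
--             "Verify directors' other company associations"
--         ])
--
--     if risk_level in ["VERY HIGH", "CRITICAL"]:
--         base_checklist.extend([
--             "Coordinate with Enforcement Directorate",
--             "Request international information exchange (DTAA)",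
--             "Engage forensic accountants",
--             "Consider provisional attachment under Section 281B",
--             "Prepare case for search under Section 132",
--             "Check FATCA/CRS information for foreign assets"
--         ])
--
--     if matched_patterns:
--         pattern_types = [p['type'] for p in matched_patterns]
--
--         if "Shell Company" in pattern_types:
--             base_checklist.extend([
--                 "Verify physical existence of business premises",
--                 "Check if registered address is shared office",
--                 "Verify genuineness of business transactions",
--                 "Check for common directors in other shell entities"
--             ])
--
--         if "Money Laundering" in pattern_types:
--             base_checklist.extend([
--                 "File STR with FIU if not already done",
--                 "Trace source of funds for large transactions",
--                 "Check for cash deposits in round figures",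
--                 "Verify KYC of major customers/suppliers"
--             ])
--
--         if "Circular Trading" in pattern_types:
--             base_checklist.extend([
--                 "Verify physical movement of goods (e-way bills)",
--                 "Check for circular invoice patterns",
--                 "Verify ITC claims with supplier returns",
--                 "Coordinate with GST Intelligence"
--             ])
--
--         if "Front Operation" in pattern_types:
--             base_checklist.extend([
--                 "Conduct surprise visit to verify operations",
--                 "Compare visual assessment with declared income",
--                 "Check for connections to larger businesses",
--                 "Verify lifestyle indicators against income"
--             ])
--
--         if "Cash Layering" in pattern_types:
--             base_checklist.extend([
--                 "Analyze all bank accounts for patterns",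
--                 "Check for structured transactions",
--                 "Verify source of cash deposits",
--                 "Cross-reference with other vendors in area"
--             ])
--
--     return base_checklist
-- ===== SOURCE B (Python) =====
-- _BASE = [
--     "Verify business registration (ROC/MCA records)",
--     "Cross-check declared revenue with GST returns",
--     "Verify employee count with PF/ESI records",
--     "Obtain Form 26AS and verify TDS credits",
-- ]
--
-- _MASTER = _BASE + [
--     "Request bank statements for last 3 years",
--     "Verify land ownership documents with Sub-Registrar",
--     "Check for related party transactions",
--     "Analyze electricity bills vs production capacity",
--     "Verify with local municipal records",
--     "Conduct surprise physical verification (Section 133A)",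
--     "Interview key management personnel",
--     "Trace fund flows to related entities",
--     "Check for overseas transactions and accounts",
--     "Obtain information from FIU-IND",
--     "Verify directors' other company associations",
--     "Coordinate with Enforcement Directorate",
--     "Request international information exchange (DTAA)",
--     "Engage forensic accountants",
--     "Consider provisional attachment under Section 281B",
--     "Prepare case for search under Section 132",
--     "Check FATCA/CRS information for foreign assets",
-- ]
--
-- # the risk tiers are cumulative, so the risk part of the checklist is always a
-- # PREFIX of _MASTER; _CUTS[rank] is its length for rank = 0 (base) .. 3 (very high)
-- _CUTS = [4, 9, 15, 21]
-- _RANK = {"MODERATE": 1, "HIGH": 2, "VERY HIGH": 3, "CRITICAL": 3}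
--
-- _PATTERN_INDEX = {
--     "Shell Company": 0,
--     "Money Laundering": 1,
--     "Circular Trading": 2,
--     "Front Operation": 3,
--     "Cash Layering": 4,
-- }
--
-- _PATTERN_ITEMS = [
--     [
--         "Verify physical existence of business premises",
--         "Check if registered address is shared office",
--         "Verify genuineness of business transactions",
--         "Check for common directors in other shell entities",
--     ],
--     [
--         "File STR with FIU if not already done",
--         "Trace source of funds for large transactions",
--         "Check for cash deposits in round figures",
--         "Verify KYC of major customers/suppliers",
--     ],
--     [
--         "Verify physical movement of goods (e-way bills)",
--         "Check for circular invoice patterns",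
--         "Verify ITC claims with supplier returns",
--         "Coordinate with GST Intelligence",
--     ],
--     [
--         "Conduct surprise visit to verify operations",
--         "Compare visual assessment with declared income",
--         "Check for connections to larger businesses",
--         "Verify lifestyle indicators against income",
--     ],
--     [
--         "Analyze all bank accounts for patterns",
--         "Check for structured transactions",
--         "Verify source of cash deposits",
--         "Cross-reference with other vendors in area",
--     ],
-- ]
--
--
-- def get_investigation_checklist(risk_level, matched_patterns=None):
--     # risk part: a closed-form prefix slice of the master list, picked by rank
--     out = _MASTER[:_CUTS[_RANK.get(risk_level, 0)]]
--     if matched_patterns: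
--         types = [p['type'] for p in matched_patterns]
--         # distinct recognised pattern indices, emitted in canonical (table) order
--         for i in sorted({_PATTERN_INDEX[t] for t in types if t in _PATTERN_INDEX}):
--             out += _PATTERN_ITEMS[i]
--     return out
-- ===== Notes on version B (the rewrite author's own statement) =====
-- stated objective: simpler
-- what changed: Instead of A's chain of membership-tested extend blocks, B exploits that the risk tiers are cumulative: it maps the risk level to a rank and takes a closed-form prefix slice of one flat master list, then replays patterns by computing the sorted set of recognised pattern indices and concatenating their item groups.
import Mathlib
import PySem

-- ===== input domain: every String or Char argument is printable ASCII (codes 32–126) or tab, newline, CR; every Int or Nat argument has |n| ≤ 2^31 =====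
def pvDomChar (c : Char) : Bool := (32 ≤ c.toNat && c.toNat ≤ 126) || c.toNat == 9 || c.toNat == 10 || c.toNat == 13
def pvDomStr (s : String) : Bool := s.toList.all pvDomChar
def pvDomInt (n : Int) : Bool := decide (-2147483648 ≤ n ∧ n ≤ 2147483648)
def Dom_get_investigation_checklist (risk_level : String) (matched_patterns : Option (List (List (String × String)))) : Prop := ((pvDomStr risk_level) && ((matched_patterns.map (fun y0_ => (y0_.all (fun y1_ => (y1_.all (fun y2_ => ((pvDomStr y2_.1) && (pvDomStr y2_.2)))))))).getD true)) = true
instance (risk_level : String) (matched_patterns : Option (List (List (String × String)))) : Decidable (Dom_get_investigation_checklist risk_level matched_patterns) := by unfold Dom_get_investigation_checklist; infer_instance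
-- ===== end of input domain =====

-- B replaces A's chain of membership-tested extend blocks by a rank → prefix-slice of one flat master list plus a sorted set of recognised pattern indices (objective: simpler).


-- ===== PORT A =====
def get_investigation_checklist (risk_level : String) (matched_patterns : Option (List (List (String × String)))) : List String :=
  let base_checklist : List String := [
    "Verify business registration (ROC/MCA records)",
    "Cross-check declared revenue with GST returns",
    "Verify employee count with PF/ESI records",
    "Obtain Form 26AS and verify TDS credits"]
  let base_checklist := if risk_level ∈ ["MODERATE", "HIGH", "VERY HIGH", "CRITICAL"] then
    base_checklist ++ [
      "Request bank statements for last 3 years",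
      "Verify land ownership documents with Sub-Registrar",
      "Check for related party transactions",
      "Analyze electricity bills vs production capacity",
      "Verify with local municipal records"]
    else base_checklist
  let base_checklist := if risk_level ∈ ["HIGH", "VERY HIGH", "CRITICAL"] then
    base_checklist ++ [
      "Conduct surprise physical verification (Section 133A)",
      "Interview key management personnel",
      "Trace fund flows to related entities",
      "Check for overseas transactions and accounts",
      "Obtain information from FIU-IND",
      "Verify directors' other company associations"]
    else base_checklist
  let base_checklist := if risk_level ∈ ["VERY HIGH", "CRITICAL"] then
    base_checklist ++ [
      "Coordinate with Enforcement Directorate",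
      "Request international information exchange (DTAA)",
      "Engage forensic accountants",
      "Consider provisional attachment under Section 281B",
      "Prepare case for search under Section 132",
      "Check FATCA/CRS information for foreign assets"]
    else base_checklist
  match matched_patterns with
  | none => base_checklist
  | some l =>
    if l = [] then base_checklist else
    -- p['type']: Pre_ guarantees the key exists; getD "" never used on admitted inputs
    let pattern_types : List String := l.map (fun p => ((PySem.Dict.mk p).get? "type").getD "")
    let base_checklist := if "Shell Company" ∈ pattern_types then
      base_checklist ++ [
        "Verify physical existence of business premises",
        "Check if registered address is shared office",
        "Verify genuineness of business transactions",
        "Check for common directors in other shell entities"]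
      else base_checklist
    let base_checklist := if "Money Laundering" ∈ pattern_types then
      base_checklist ++ [
        "File STR with FIU if not already done",
        "Trace source of funds for large transactions",
        "Check for cash deposits in round figures",
        "Verify KYC of major customers/suppliers"]
      else base_checklist
    let base_checklist := if "Circular Trading" ∈ pattern_types then
      base_checklist ++ [
        "Verify physical movement of goods (e-way bills)",
        "Check for circular invoice patterns",
        "Verify ITC claims with supplier returns",
        "Coordinate with GST Intelligence"]
      else base_checklist
    let base_checklist := if "Front Operation" ∈ pattern_types then
      base_checklist ++ [
        "Conduct surprise visit to verify operations",
        "Compare visual assessment with declared income",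
        "Check for connections to larger businesses",
        "Verify lifestyle indicators against income"]
      else base_checklist
    let base_checklist := if "Cash Layering" ∈ pattern_types then
      base_checklist ++ [
        "Analyze all bank accounts for patterns",
        "Check for structured transactions",
        "Verify source of cash deposits",
        "Cross-reference with other vendors in area"]
      else base_checklist
    base_checklist

-- ===== PORT B =====
def pvMaster : List String := [
  "Verify business registration (ROC/MCA records)",
  "Cross-check declared revenue with GST returns",
  "Verify employee count with PF/ESI records",
  "Obtain Form 26AS and verify TDS credits",
  "Request bank statements for last 3 years",
  "Verify land ownership documents with Sub-Registrar",
  "Check for related party transactions",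
  "Analyze electricity bills vs production capacity",
  "Verify with local municipal records",
  "Conduct surprise physical verification (Section 133A)",
  "Interview key management personnel",
  "Trace fund flows to related entities",
  "Check for overseas transactions and accounts",
  "Obtain information from FIU-IND",
  "Verify directors' other company associations",
  "Coordinate with Enforcement Directorate",
  "Request international information exchange (DTAA)",
  "Engage forensic accountants",
  "Consider provisional attachment under Section 281B",
  "Prepare case for search under Section 132",
  "Check FATCA/CRS information for foreign assets"]

def pvCuts : List Int := [4, 9, 15, 21]

def pvRank : PySem.Dict String Int :=
  PySem.Dict.mk [("MODERATE", 1), ("HIGH", 2), ("VERY HIGH", 3), ("CRITICAL", 3)]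

def pvPatIdx : PySem.Dict String Int :=
  PySem.Dict.mk [("Shell Company", 0), ("Money Laundering", 1), ("Circular Trading", 2),
                 ("Front Operation", 3), ("Cash Layering", 4)]

def pvPatItems : List (List String) := [
  ["Verify physical existence of business premises",
   "Check if registered address is shared office",
   "Verify genuineness of business transactions",
   "Check for common directors in other shell entities"],
  ["File STR with FIU if not already done",
   "Trace source of funds for large transactions",
   "Check for cash deposits in round figures",
   "Verify KYC of major customers/suppliers"],
  ["Verify physical movement of goods (e-way bills)",
   "Check for circular invoice patterns",
   "Verify ITC claims with supplier returns",
   "Coordinate with GST Intelligence"],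
  ["Conduct surprise visit to verify operations",
   "Compare visual assessment with declared income",
   "Check for connections to larger businesses",
   "Verify lifestyle indicators against income"],
  ["Analyze all bank accounts for patterns",
   "Check for structured transactions",
   "Verify source of cash deposits",
   "Cross-reference with other vendors in area"]]

def get_investigation_checklist_alt (risk_level : String) (matched_patterns : Option (List (List (String × String)))) : List String :=
  -- out = _MASTER[:_CUTS[_RANK.get(risk_level, 0)]]  (rank always indexes pvCuts in range)
  let out := PySem.List.slice pvMaster none
    (some ((PySem.List.pyGet? pvCuts (pvRank.getD risk_level 0)).getD 0))
  match matched_patterns with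
  | none => out
  | some l =>
    if l = [] then out else
    -- types = [p['type'] for p in matched_patterns]; Pre_ guarantees the key exists
    let types : List String := l.map (fun p => ((PySem.Dict.mk p).get? "type").getD "")
    -- {_PATTERN_INDEX[t] for t in types if t in _PATTERN_INDEX}: the contained keys' indices, as a set
    let idxs : PySem.Set Int := PySem.Set.ofList (types.filterMap (fun t => pvPatIdx.get? t))
    -- for i in sorted(idxs): out += _PATTERN_ITEMS[i]  (i always in range)
    (PySem.List.sorted idxs (fun x => x) false).foldl
      (fun acc i => acc ++ (PySem.List.pyGet? pvPatItems i).getD []) out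

-- ===== PRECONDITION & SPEC =====
-- Pre_ excludes a truthy (non-empty) matched_patterns containing a dict without a "type" key,
-- on which both A and B raise KeyError.
def Pre_get_investigation_checklist (risk_level : String) (matched_patterns : Option (List (List (String × String)))) : Prop :=
  ∀ l, matched_patterns = some l → l ≠ [] → ∀ p ∈ l, "type" ∈ p.map Prod.fst
instance (risk_level : String) (matched_patterns : Option (List (List (String × String)))) : Decidable (Pre_get_investigation_checklist risk_level matched_patterns) := by unfold Pre_get_investigation_checklist; infer_instance
def pvWitness_get_investigation_checklist : String × (Option (List (List (String × String)))) := ("HIGH", some [[("type", "Shell Company")]])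

def Spec_get_investigation_checklist (risk_level : String) (matched_patterns : Option (List (List (String × String)))) (out : List String) : Prop := out = get_investigation_checklist_alt risk_level matched_patterns
instance (risk_level : String) (matched_patterns : Option (List (List (String × String)))) (out : List String) : Decidable (Spec_get_investigation_checklist risk_level matched_patterns out) := by unfold Spec_get_investigation_checklist; infer_instance

-- ===== CLAIM =====
def Claim_equal_get_investigation_checklist : Prop := ∀ (risk_level : String) (matched_patterns : Option (List (List (String × String)))), Dom_get_investigation_checklist risk_level matched_patterns → Pre_get_investigation_checklist risk_level matched_patterns → Spec_get_investigation_checklist risk_level matched_patterns (get_investigation_checklist risk_level matched_patterns)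

-- ===== LEMMAS AND PROOFS =====

-- the risk part: A's three conditional extends equal B's prefix slice, for every string
lemma pv_risk_eq (rl : String) :
    (let b0 : List String := [
      "Verify business registration (ROC/MCA records)",
      "Cross-check declared revenue with GST returns",
      "Verify employee count with PF/ESI records",
      "Obtain Form 26AS and verify TDS credits"]
     let b1 := if rl ∈ ["MODERATE", "HIGH", "VERY HIGH", "CRITICAL"] then
       b0 ++ [
        "Request bank statements for last 3 years",
        "Verify land ownership documents with Sub-Registrar",
        "Check for related party transactions",
        "Analyze electricity bills vs production capacity",
        "Verify with local municipal records"] else b0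
     let b2 := if rl ∈ ["HIGH", "VERY HIGH", "CRITICAL"] then
       b1 ++ [
        "Conduct surprise physical verification (Section 133A)",
        "Interview key management personnel",
        "Trace fund flows to related entities",
        "Check for overseas transactions and accounts",
        "Obtain information from FIU-IND",
        "Verify directors' other company associations"] else b1
     if rl ∈ ["VERY HIGH", "CRITICAL"] then
       b2 ++ [
        "Coordinate with Enforcement Directorate",
        "Request international information exchange (DTAA)",
        "Engage forensic accountants",
        "Consider provisional attachment under Section 281B",
        "Prepare case for search under Section 132",
        "Check FATCA/CRS information for foreign assets"] else b2)
    = PySem.List.slice pvMaster none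
        (some ((PySem.List.pyGet? pvCuts (pvRank.getD rl 0)).getD 0)) := by
  by_cases h1 : rl = "MODERATE"
  · subst h1; decide
  by_cases h2 : rl = "HIGH"
  · subst h2; decide
  by_cases h3 : rl = "VERY HIGH"
  · subst h3; decide
  by_cases h4 : rl = "CRITICAL"
  · subst h4; decide
  · rw [show pvRank.getD rl 0 = 0 from by
        simp [pvRank, PySem.Dict.getD, PySem.Dict.get?,
              Ne.symm h1, Ne.symm h2, Ne.symm h3, Ne.symm h4]]
    simp [h1, h2, h3, h4]
    decide

-- pvPatIdx lookup characterised: which key yields which index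
lemma pv_patIdx_eq_some (t : String) (i : Int) :
    pvPatIdx.get? t = some i ↔
      (t = "Shell Company" ∧ i = 0) ∨ (t = "Money Laundering" ∧ i = 1) ∨
      (t = "Circular Trading" ∧ i = 2) ∨ (t = "Front Operation" ∧ i = 3) ∨
      (t = "Cash Layering" ∧ i = 4) := by
  by_cases h1 : t = "Shell Company"; · subst h1; simp [pvPatIdx, PySem.Dict.get?_mk_cons, eq_comm]
  by_cases h2 : t = "Money Laundering"; · subst h2; simp [pvPatIdx, PySem.Dict.get?_mk_cons, eq_comm]
  by_cases h3 : t = "Circular Trading"; · subst h3; simp [pvPatIdx, PySem.Dict.get?_mk_cons, eq_comm]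
  by_cases h4 : t = "Front Operation"; · subst h4; simp [pvPatIdx, PySem.Dict.get?_mk_cons, eq_comm]
  by_cases h5 : t = "Cash Layering"; · subst h5; simp [pvPatIdx, PySem.Dict.get?_mk_cons, eq_comm]
  simp [pvPatIdx, PySem.Dict.get?, Ne.symm h1, Ne.symm h2, Ne.symm h3,
        Ne.symm h4, Ne.symm h5, h1, h2, h3, h4, h5]

-- some index i is produced by the types list ↔ the corresponding name occurs in it
lemma pv_mem_idxs (types : List String) (i : Int) (name : String)
    (hname : pvPatIdx.get? name = some i)
    (hinj : ∀ t, pvPatIdx.get? t = some i → t = name) :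
    (∃ a ∈ types, pvPatIdx.get? a = some i) ↔ name ∈ types := by
  constructor
  · rintro ⟨t, ht, hget⟩; rwa [hinj t hget] at ht
  · intro h; exact ⟨name, h, hname⟩

-- every element of B's index set is one of 0..4
lemma pv_idxs_range (types : List String) (i : Int)
    (h : i ∈ PySem.Set.ofList (types.filterMap (fun t => pvPatIdx.get? t))) :
    i ∈ ([0, 1, 2, 3, 4] : List Int) := by
  rw [PySem.Set.mem_ofList, List.mem_filterMap] at h
  obtain ⟨t, -, hget⟩ := h
  rcases (pv_patIdx_eq_some t i).mp hget with ⟨-, h⟩ | ⟨-, h⟩ | ⟨-, h⟩ | ⟨-, h⟩ | ⟨-, h⟩ <;>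
    simp [h]

-- sorting B's set of indices is filtering the canonical list [0,1,2,3,4] by membership
lemma pv_sorted_idxs (types : List String) :
    PySem.List.sorted (PySem.Set.ofList (types.filterMap (fun t => pvPatIdx.get? t)))
      (fun x => x) false
    = ([0, 1, 2, 3, 4] : List Int).filter
        (fun i => decide (i ∈ PySem.Set.ofList (types.filterMap (fun t => pvPatIdx.get? t)))) := by
  apply PySem.List.sorted_eq_of_perm_of_pairwise_lt
  · rw [List.perm_ext_iff_of_nodup (List.Nodup.filter _ (by decide)) (PySem.Set.nodup_ofList _)]
    intro a
    simp only [List.mem_filter, decide_eq_true_eq]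
    exact ⟨fun h => h.2, fun h => ⟨pv_idxs_range types a h, h⟩⟩
  · exact List.Pairwise.filter _ (by decide)

-- ===== VERDICT =====
theorem get_investigation_checklist_spec : Claim_equal_get_investigation_checklist := by
  intro rl mp _ _
  unfold Spec_get_investigation_checklist get_investigation_checklist get_investigation_checklist_alt
  rw [← pv_risk_eq rl]
  cases mp with
  | none => rfl
  | some l =>
    by_cases hl : l = []
    · simp [hl]
    · simp only [if_neg hl]
      rw [pv_sorted_idxs]
      generalize l.map (fun p => ((PySem.Dict.mk p).get? "type").getD "") = ts
      have m0 : (∃ a ∈ ts, pvPatIdx.get? a = some (0:Int)) ↔ "Shell Company" ∈ ts :=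
        pv_mem_idxs ts 0 _ (by decide) (fun t h => by
          rcases (pv_patIdx_eq_some t 0).mp h with ⟨h', _⟩ | ⟨_, h'⟩ | ⟨_, h'⟩ | ⟨_, h'⟩ | ⟨_, h'⟩
          · exact h'
          all_goals exact absurd h' (by decide))
      have m1 : (∃ a ∈ ts, pvPatIdx.get? a = some (1:Int)) ↔ "Money Laundering" ∈ ts :=
        pv_mem_idxs ts 1 _ (by decide) (fun t h => by
          rcases (pv_patIdx_eq_some t 1).mp h with ⟨_, h'⟩ | ⟨h', _⟩ | ⟨_, h'⟩ | ⟨_, h'⟩ | ⟨_, h'⟩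
          · exact absurd h' (by decide)
          · exact h'
          all_goals exact absurd h' (by decide))
      have m2 : (∃ a ∈ ts, pvPatIdx.get? a = some (2:Int)) ↔ "Circular Trading" ∈ ts :=
        pv_mem_idxs ts 2 _ (by decide) (fun t h => by
          rcases (pv_patIdx_eq_some t 2).mp h with ⟨_, h'⟩ | ⟨_, h'⟩ | ⟨h', _⟩ | ⟨_, h'⟩ | ⟨_, h'⟩
          · exact absurd h' (by decide)
          · exact absurd h' (by decide)
          · exact h'
          all_goals exact absurd h' (by decide))
      have m3 : (∃ a ∈ ts, pvPatIdx.get? a = some (3:Int)) ↔ "Front Operation" ∈ ts :=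
        pv_mem_idxs ts 3 _ (by decide) (fun t h => by
          rcases (pv_patIdx_eq_some t 3).mp h with ⟨_, h'⟩ | ⟨_, h'⟩ | ⟨_, h'⟩ | ⟨h', _⟩ | ⟨_, h'⟩
          · exact absurd h' (by decide)
          · exact absurd h' (by decide)
          · exact absurd h' (by decide)
          · exact h'
          · exact absurd h' (by decide))
      have m4 : (∃ a ∈ ts, pvPatIdx.get? a = some (4:Int)) ↔ "Cash Layering" ∈ ts :=
        pv_mem_idxs ts 4 _ (by decide) (fun t h => by
          rcases (pv_patIdx_eq_some t 4).mp h with ⟨_, h'⟩ | ⟨_, h'⟩ | ⟨_, h'⟩ | ⟨_, h'⟩ | ⟨h', _⟩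
          · exact absurd h' (by decide)
          · exact absurd h' (by decide)
          · exact absurd h' (by decide)
          · exact absurd h' (by decide)
          · exact h')
      by_cases p0 : "Shell Company" ∈ ts <;>
        by_cases p1 : "Money Laundering" ∈ ts <;>
          by_cases p2 : "Circular Trading" ∈ ts <;>
            by_cases p3 : "Front Operation" ∈ ts <;>
              by_cases p4 : "Cash Layering" ∈ ts <;>
        simp [List.filter_nil, m0, m1, m2, m3, m4,
              p0, p1, p2, p3, p4, List.foldl, PySem.List.pyGet?, PySem.List.pyIdx?, pvPatItems]
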